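-- pv_equiv track=rewrite | github.com/ONLYOFFICE/build_tools | scripts/sln.py | get_full_projects_list
-- ===== SOURCE A (Python) =====
-- def get_full_projects_list(json_data, list):
--   result = []
--   for rec in list:
--     if rec in json_data:
--       result += get_full_projects_list(json_data, json_data[rec])
--     else:
--       result.append(rec)
--   return result
-- ===== SOURCE B (Python) =====
-- def get_full_projects_list(json_data, list):
--   result = []
--   stack = list[::-1]
--   while stack:
--     item = stack.pop()
--     if item in json_data:
--       stack.extend(reversed(json_data[item]))
--     else:
--       result.append(item)
--   return result
-- ===== Notes on version B (the rewrite author's own statement) =====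
-- stated objective: alternative
-- what changed: Replaced A's recursion (recursive call per dictionary key) by an iterative pre-order DFS with an explicit stack: children are pushed in reverse onto the stack, so no recursion and no Python recursion-limit exposure.
import Mathlib
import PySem

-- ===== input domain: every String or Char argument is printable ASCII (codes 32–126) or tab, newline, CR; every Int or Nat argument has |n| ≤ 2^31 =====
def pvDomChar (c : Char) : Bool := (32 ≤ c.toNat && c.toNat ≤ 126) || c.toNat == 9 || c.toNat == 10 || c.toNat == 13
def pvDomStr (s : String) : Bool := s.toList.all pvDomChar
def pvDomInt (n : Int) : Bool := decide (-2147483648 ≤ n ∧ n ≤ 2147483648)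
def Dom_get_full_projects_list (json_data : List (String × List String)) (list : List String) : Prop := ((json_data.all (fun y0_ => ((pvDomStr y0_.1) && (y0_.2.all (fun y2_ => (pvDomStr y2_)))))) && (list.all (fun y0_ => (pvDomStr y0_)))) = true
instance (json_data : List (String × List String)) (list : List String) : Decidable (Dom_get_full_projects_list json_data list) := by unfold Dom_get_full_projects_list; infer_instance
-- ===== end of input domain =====

-- B replaces A's recursion by an iterative pre-order DFS with an explicit stack (children pushed in reverse); same output.
-- Dictionary lookup: first match in the association list (the type-convention's dict semantics).
def pvLookup (json_data : List (String × List String)) (k : String) : Option (List String) :=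
  (json_data.find? (fun p => p.1 == k)).map Prod.snd

-- ===== PORT A =====
-- A's recursion is not structurally terminating (cyclic data loops forever / RecursionError in Python),
-- so the port carries a fuel argument; fuel json_data.length + 1 is provably enough on Pre_ (where A returns).
def pvGoA (json_data : List (String × List String)) : Nat → List String → List String
  | 0, _ => []
  | n + 1, l =>
    l.foldl (fun result rec =>
      match pvLookup json_data rec with
      | some ch => result ++ pvGoA json_data n ch
      | none => result ++ [rec]) []

def get_full_projects_list (json_data : List (String × List String)) (list : List String) : List String :=
  pvGoA json_data (json_data.length + 1) list

-- ===== PORT B =====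
-- pvCost: fuel (exact iteration count of B's while-loop on Pre_ inputs); a totality guard only.
def pvCost (json_data : List (String × List String)) : Nat → List String → Nat
  | _, [] => 0
  | 0, _ :: l => 1 + pvCost json_data 0 l
  | n + 1, x :: l =>
    (match pvLookup json_data x with
     | some ch => 1 + pvCost json_data n ch
     | none => 1) + pvCost json_data (n + 1) l
  termination_by n l => (n, l.length)

-- the while-loop: stack head = Python stack top; extending with reversed children = ch ++ st here.
def pvGoB (json_data : List (String × List String)) : Nat → List String → List String → List String
  | _, [], result => result
  | 0, _ :: _, result => result
  | f + 1, x :: st, result =>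
    match pvLookup json_data x with
    | some ch => pvGoB json_data f (ch ++ st) result
    | none => pvGoB json_data f st (result ++ [x])

def get_full_projects_list_alt (json_data : List (String × List String)) (list : List String) : List String :=
  pvGoB json_data (pvCost json_data json_data.length list) list []

-- ===== PRECONDITION & SPEC =====
-- pvFine n l: every chain of dictionary-key expansions starting from l has depth ≤ n
-- (it inspects the input's reachability shape only; it computes no output).
def pvFine (json_data : List (String × List String)) : Nat → List String → Bool
  | 0, l => l.all (fun x => (pvLookup json_data x).isNone)
  | n + 1, l => l.all (fun x =>
      match pvLookup json_data x with
      | none => true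
      | some ch => pvFine json_data n ch)

-- Pre_ is a shape condition on the dictionary's reference graph, not a run of either port: every chain of
-- nested key references starting from `list` has depth ≤ number of dictionary entries, i.e. no cycle is
-- reachable from `list` — exactly the inputs where Python's A terminates instead of recursing forever
-- (RecursionError). It computes no output of the algorithm.
def Pre_get_full_projects_list (json_data : List (String × List String)) (list : List String) : Prop :=
  pvFine json_data json_data.length list = true

instance (json_data : List (String × List String)) (list : List String) : Decidable (Pre_get_full_projects_list json_data list) := by unfold Pre_get_full_projects_list; infer_instance

def pvWitness_get_full_projects_list : (List (String × List String)) × List String :=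
  ([("a", ["x", "y"])], ["a", "z"])

def Spec_get_full_projects_list (json_data : List (String × List String)) (list : List String) (out : List String) : Prop := out = get_full_projects_list_alt json_data list
instance (json_data : List (String × List String)) (list : List String) (out : List String) : Decidable (Spec_get_full_projects_list json_data list out) := by unfold Spec_get_full_projects_list; infer_instance

-- ===== CLAIM (what is proved, stated in full; the proofs are below) =====
def Claim_equal_get_full_projects_list : Prop := ∀ (json_data : List (String × List String)) (list : List String), Dom_get_full_projects_list json_data list → Pre_get_full_projects_list json_data list → Spec_get_full_projects_list json_data list (get_full_projects_list json_data list)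

-- ===== LEMMAS AND PROOFS =====

theorem pvGoA_succ (json_data : List (String × List String)) (n : Nat) (l : List String) :
    pvGoA json_data (n + 1) l =
      l.flatMap (fun x =>
        match pvLookup json_data x with
        | some ch => pvGoA json_data n ch
        | none => [x]) := by
  show l.foldl _ [] = _
  have h : (fun (result : List String) (rec : String) =>
      match pvLookup json_data rec with
      | some ch => result ++ pvGoA json_data n ch
      | none => result ++ [rec]) =
      (fun result rec => result ++
        match pvLookup json_data rec with
        | some ch => pvGoA json_data n ch
        | none => [rec]) := by
    funext result rec
    cases pvLookup json_data rec <;> rfl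
  rw [h, PySem.List.foldl_append_eq_flatMap]
  simp

theorem pvMain (json_data : List (String × List String)) (n : Nat) :
    ∀ l, pvFine json_data n l = true → ∀ st res f,
      pvGoB json_data (f + pvCost json_data n l) (l ++ st) res =
        pvGoB json_data f st (res ++ pvGoA json_data (n + 1) l) := by
  induction n with
  | zero =>
    intro l
    induction l with
    | nil =>
      intro _ st res f
      simp [pvCost, pvGoA_succ]
    | cons x l' ihl =>
      intro h st res f
      simp only [pvFine, List.all_cons, Bool.and_eq_true] at h
      obtain ⟨hx, hl'⟩ := h
      have hfl' : pvFine json_data 0 l' = true := by rw [pvFine]; exact hl'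
      cases hlk : pvLookup json_data x with
      | some ch => simp [hlk] at hx
      | none =>
        have hc : pvCost json_data 0 (x :: l') = 1 + pvCost json_data 0 l' := by
          simp [pvCost]
        rw [hc, pvGoA_succ]
        have hf : f + (1 + pvCost json_data 0 l') = (f + pvCost json_data 0 l') + 1 := by omega
        rw [hf]
        show pvGoB json_data ((f + pvCost json_data 0 l') + 1) (x :: (l' ++ st)) res = _
        simp only [pvGoB, hlk]
        have := ihl hfl' st (res ++ [x]) f
        rw [this, pvGoA_succ]
        simp [hlk]
  | succ m ih =>
    intro l
    induction l with
    | nil =>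
      intro _ st res f
      simp [pvCost, pvGoA_succ]
    | cons x l' ihl =>
      intro h st res f
      simp only [pvFine, List.all_cons, Bool.and_eq_true] at h
      obtain ⟨hx, hl'⟩ := h
      have hfl' : pvFine json_data (m + 1) l' = true := by rw [pvFine]; exact hl'
      cases hlk : pvLookup json_data x with
      | none =>
        have hc : pvCost json_data (m + 1) (x :: l') = 1 + pvCost json_data (m + 1) l' := by
          simp [pvCost, hlk]
        rw [hc, pvGoA_succ]
        have hf : f + (1 + pvCost json_data (m + 1) l') = (f + pvCost json_data (m + 1) l') + 1 := by omega
        rw [hf]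
        show pvGoB json_data ((f + pvCost json_data (m + 1) l') + 1) (x :: (l' ++ st)) res = _
        simp only [pvGoB, hlk]
        have := ihl hfl' st (res ++ [x]) f
        rw [this, pvGoA_succ]
        simp [hlk]
      | some ch =>
        have hch : pvFine json_data m ch = true := by
          rw [hlk] at hx; simpa using hx
        have hc : pvCost json_data (m + 1) (x :: l') =
            (1 + pvCost json_data m ch) + pvCost json_data (m + 1) l' := by
          simp [pvCost, hlk]
        rw [hc, pvGoA_succ]
        have hf : f + ((1 + pvCost json_data m ch) + pvCost json_data (m + 1) l') =
            ((f + pvCost json_data (m + 1) l') + pvCost json_data m ch) + 1 := by omega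
        rw [hf]
        show pvGoB json_data (((f + pvCost json_data (m + 1) l') + pvCost json_data m ch) + 1)
            (x :: (l' ++ st)) res = _
        simp only [pvGoB, hlk]
        have h1 := ih ch hch (l' ++ st) res (f + pvCost json_data (m + 1) l')
        rw [h1]
        have h2 := ihl hfl' st (res ++ pvGoA json_data (m + 1) ch) f
        rw [h2]
        simp only [List.flatMap_cons, hlk, ← pvGoA_succ, List.append_assoc]

-- ===== VERDICT (by name: the statement is the Claim_ definition above) =====
theorem get_full_projects_list_spec : Claim_equal_get_full_projects_list := by
  unfold Claim_equal_get_full_projects_list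
  intro json_data list _ hpre
  unfold Spec_get_full_projects_list get_full_projects_list get_full_projects_list_alt
  have := pvMain json_data json_data.length list hpre [] [] 0
  simp only [List.append_nil, List.nil_append, Nat.zero_add] at this
  rw [this]
  rfl
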